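-- pv_equiv track=rewrite | github.com/PrinceSinghhub/GFG-Questions | Segregate 0s and 1s.py | segregate0and1
-- ===== SOURCE A (Python) =====
-- def segregate0and1(arr, n):
--
--     dp = []
--     for i in range(n):
--         if arr[i] == 1:
--             dp.append(1)
--         else:
--             dp.insert(0, 0)
--     arr[:] = dp
--     return arr
-- ===== SOURCE B (Python) =====
-- def segregate0and1(arr, n):
--     bits = [1 if x == 1 else 0 for _, x in zip(range(n), arr)]
--     bits.sort()
--     arr[:] = bits
--     return arr
-- ===== Notes on version B (the rewrite author's own statement) =====
-- stated objective: faster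
-- what changed: A builds the result element-by-element with dp.insert(0, 0) (quadratic front insertion over indices); B instead maps the first n elements to 0/1 bits via zip(range(n), arr) in one comprehension and sorts the bit list, never touching indices.
import Mathlib
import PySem

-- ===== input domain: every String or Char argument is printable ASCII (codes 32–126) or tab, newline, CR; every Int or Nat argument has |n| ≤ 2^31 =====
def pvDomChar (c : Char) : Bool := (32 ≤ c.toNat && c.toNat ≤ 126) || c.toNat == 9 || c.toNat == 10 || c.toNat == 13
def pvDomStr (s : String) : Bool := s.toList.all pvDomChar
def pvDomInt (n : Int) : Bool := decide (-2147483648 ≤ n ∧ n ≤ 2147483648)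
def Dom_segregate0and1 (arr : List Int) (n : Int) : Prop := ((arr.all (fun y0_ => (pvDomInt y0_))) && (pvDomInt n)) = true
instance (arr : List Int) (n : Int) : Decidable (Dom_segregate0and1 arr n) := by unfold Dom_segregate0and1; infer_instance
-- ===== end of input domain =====

-- B replaces A's quadratic dp.insert(0,0) front-insertion index loop by mapping the first n
-- elements to 0/1 bits (zip with range(n)) and sorting the bit list (asymptotically faster).
-- Both A and B mutate arr in place (arr[:] = result); the equivalence proved is about the return value.


-- ===== PORT A =====
-- the for-loop of A over range(n): dp.append(1) / dp.insert(0, 0); none = IndexError on arr[i]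
def segALoop (arr : List Int) : List Int → List Int → Option (List Int)
  | [], dp => some dp
  | i :: rest, dp =>
    match PySem.List.pyGet? arr i with
    | none => none
    | some v => segALoop arr rest (if v = 1 then dp ++ [1] else 0 :: dp)

def segregate0and1 (arr : List Int) (n : Int) : List Int :=
  match segALoop arr (PySem.List.pyRange 0 n 1) [] with
  | none => []        -- unreachable under Pre_ (Python raises IndexError here)
  | some dp => dp     -- arr[:] = dp; return arr

-- ===== PORT B =====
-- bits = [1 if x == 1 else 0 for _, x in zip(range(n), arr)]; bits.sort(); return bits
def segregate0and1_alt (arr : List Int) (n : Int) : List Int :=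
  let bits := ((PySem.List.pyRange 0 n 1).zip arr).map (fun p => if p.2 = 1 then (1 : Int) else 0)
  PySem.List.sorted bits (fun x => x) false

-- ===== PRECONDITION & SPEC =====
-- A raises IndexError iff n > len(arr) (it reads arr[i] for i in range(n)); excluded here.
def Pre_segregate0and1 (arr : List Int) (n : Int) : Prop := n ≤ (arr.length : Int)
instance (arr : List Int) (n : Int) : Decidable (Pre_segregate0and1 arr n) := by
  unfold Pre_segregate0and1; infer_instance

def pvWitness_segregate0and1 : List Int × Int := ([1, 0, 1, 2, 0], 5)

def Spec_segregate0and1 (arr : List Int) (n : Int) (out : List Int) : Prop := out = segregate0and1_alt arr n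
instance (arr : List Int) (n : Int) (out : List Int) : Decidable (Spec_segregate0and1 arr n out) := by unfold Spec_segregate0and1; infer_instance

-- ===== CLAIM (what is proved, stated in full; the proofs are below) =====
def Claim_equal_segregate0and1 : Prop := ∀ (arr : List Int) (n : Int), Dom_segregate0and1 arr n → Pre_segregate0and1 arr n → Spec_segregate0and1 arr n (segregate0and1 arr n)

-- ===== LEMMAS AND PROOFS =====

-- A's loop appends one 1 per fetched value equal to 1 and front-inserts one 0 per other value
theorem segALoop_counts (arr : List Int) :
    ∀ (idxs : List Int), (∀ i ∈ idxs, (PySem.List.pyGet? arr i).isSome) →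
    ∀ (a b : ℕ),
      segALoop arr idxs (List.replicate a 0 ++ List.replicate b 1)
        = some (List.replicate
                  (a + (idxs.map (fun i => (PySem.List.pyGet? arr i).getD 0)).countP (fun v => !(v == 1))) 0
                ++ List.replicate
                  (b + (idxs.map (fun i => (PySem.List.pyGet? arr i).getD 0)).count 1) 1) := by
  intro idxs
  induction idxs with
  | nil => intro _ a b; simp [segALoop]
  | cons i rest ih =>
    intro h a b
    obtain ⟨v, hv⟩ := Option.isSome_iff_exists.mp (h i (List.mem_cons_self ..))
    have hrest : ∀ j ∈ rest, (PySem.List.pyGet? arr j).isSome :=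
      fun j hj => h j (List.mem_cons_of_mem _ hj)
    by_cases hv1 : v = 1
    · have step : segALoop arr (i :: rest) (List.replicate a 0 ++ List.replicate b 1)
          = segALoop arr rest (List.replicate a 0 ++ List.replicate (b + 1) 1) := by
        simp [segALoop, hv, hv1, List.replicate_succ' (n := b), List.append_assoc]
      rw [step, ih hrest a (b + 1)]
      subst hv1
      simp only [List.map_cons, hv, Option.getD_some, List.countP_cons, List.count_cons]
      norm_num
      omega
    · have step : segALoop arr (i :: rest) (List.replicate a 0 ++ List.replicate b 1)
          = segALoop arr rest (List.replicate (a + 1) 0 ++ List.replicate b 1) := by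
        simp [segALoop, hv, hv1, List.replicate_succ]
      rw [step, ih hrest (a + 1) b]
      simp only [List.map_cons, hv, Option.getD_some, List.countP_cons, List.count_cons]
      simp [hv1]
      omega

-- the values A fetches over range(n) are exactly arr[:n]
theorem vals_pyRange (arr : List Int) (n : Int) (h : n ≤ (arr.length : Int)) :
    (PySem.List.pyRange 0 n 1).map (fun i => (PySem.List.pyGet? arr i).getD 0)
      = arr.take n.toNat := by
  apply List.ext_getElem
  · simp [PySem.List.length_pyRange_one]
    omega
  · intro k hk1 hk2
    have hkn : k < n.toNat := by simpa [PySem.List.length_pyRange_one] using hk1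
    have hkl : k < arr.length := by omega
    simp only [List.getElem_map, PySem.List.getElem_pyRange_one]
    rw [show ((0:Int) + k) = ((k : Nat) : Int) from by omega, PySem.List.pyGet?_natCast]
    simp [List.getElem?_eq_getElem hkl]

-- snd of a zip is a prefix of the right list
theorem map_snd_zip_take {α β : Type} (l1 : List α) (l2 : List β) :
    (l1.zip l2).map Prod.snd = l2.take l1.length := by
  induction l1 generalizing l2 with
  | nil => simp
  | cons x xs ih => cases l2 <;> simp [ih]

-- a list of 0/1 bits is a permutation of count-many 0s followed by count-many 1s
theorem perm_replicate_bits :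
    ∀ (xs : List Int), (∀ x ∈ xs, x = 0 ∨ x = 1) →
      (List.replicate (xs.count 0) (0:Int) ++ List.replicate (xs.count 1) (1:Int)).Perm xs := by
  intro xs
  induction xs with
  | nil => simp
  | cons x xs ih =>
    intro h
    have hx := h x (List.mem_cons_self ..)
    have hrest : ∀ y ∈ xs, y = 0 ∨ y = 1 := fun y hy => h y (List.mem_cons_of_mem _ hy)
    rcases hx with h0 | h1
    · subst h0
      simp only [List.count_cons_self]
      rw [List.replicate_succ]
      exact List.Perm.cons 0 (ih hrest)
    · subst h1
      simp only [List.count_cons_self]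
      rw [List.replicate_succ' , ← List.append_assoc]
      exact ((List.perm_append_singleton 1 _).trans (List.Perm.cons 1 (ih hrest)))

theorem segregate0and1_spec : Claim_equal_segregate0and1 := by
  intro arr n _ hpre
  unfold Spec_segregate0and1 Pre_segregate0and1 at *
  have hmem : ∀ i ∈ PySem.List.pyRange 0 n 1, (PySem.List.pyGet? arr i).isSome := by
    intro i hi
    rw [PySem.List.mem_pyRange_one] at hi
    rw [PySem.List.pyGet?_eq_some_getElem (xs := arr) hi.1 (by omega)]
    exact Option.isSome_some
  have hA := segALoop_counts arr (PySem.List.pyRange 0 n 1) hmem 0 0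
  rw [vals_pyRange arr n hpre] at hA
  simp only [List.replicate_zero, List.nil_append, Nat.zero_add] at hA
  set xs := arr.take n.toNat with hxs
  have hbits : ((PySem.List.pyRange 0 n 1).zip arr).map (fun p => if p.2 = 1 then (1:Int) else 0)
      = xs.map (fun v => if v = 1 then (1:Int) else 0) := by
    have hcomp : ((PySem.List.pyRange 0 n 1).zip arr).map (fun p => if p.2 = 1 then (1:Int) else 0)
        = (((PySem.List.pyRange 0 n 1).zip arr).map Prod.snd).map (fun v => if v = 1 then (1:Int) else 0) := by
      rw [List.map_map]
      rfl
    rw [hcomp, map_snd_zip_take, PySem.List.length_pyRange_one]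
    simp only [Int.sub_zero, hxs, List.map_take]
  set f : Int → Int := fun v => if v = 1 then (1:Int) else 0 with hf
  have h01 : ∀ x ∈ xs.map f, x = 0 ∨ x = 1 := by
    intro x hx
    obtain ⟨v, _, hv⟩ := List.mem_map.mp hx
    by_cases h1 : v = 1 <;> simp [hf, h1] at hv <;> omega
  have hperm := perm_replicate_bits (xs.map f) h01
  have hpair : (List.replicate ((xs.map f).count 0) (0:Int)
      ++ List.replicate ((xs.map f).count 1) (1:Int)).Pairwise (fun a b => a ≤ b) := by
    apply List.pairwise_append.mpr
    refine ⟨List.pairwise_replicate.mpr (by simp), List.pairwise_replicate.mpr (by simp), ?_⟩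
    intro a ha b hb
    rw [List.eq_of_mem_replicate ha, List.eq_of_mem_replicate hb]
    decide
  have hsorted := PySem.List.sorted_id_eq_of_perm_of_pairwise _ _ hperm hpair
  have hc1 : (xs.map f).count 1 = xs.count 1 := by
    simp only [List.count, List.countP_map]
    apply List.countP_congr
    intro v _
    by_cases h1 : v = 1 <;> simp [hf, h1]
  have hc0 : (xs.map f).count 0 = xs.countP (fun v => !(v == 1)) := by
    simp only [List.count, List.countP_map]
    apply List.countP_congr
    intro v _
    by_cases h1 : v = 1 <;> simp [hf, h1]
  unfold segregate0and1 segregate0and1_alt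
  rw [hA, hbits, hsorted, hc1, hc0]
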